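-- pv_equiv track=rewrite | github.com/yangji9181/HINSE | eigen_cal_all.py | dfs
-- ===== SOURCE A (Python) =====
-- def dfs(node, graph,visited,connected_components, indexing, index_num):
--     if node in connected_components: return connected_components[node]
--     if node in visited:
--         return 0
--     stack = []
--     res = 1
--     visited.add(node)
--     stack.append(node)
--     while len(stack) > 0:
--         cur_node = stack.pop()
--         for neigh in graph[cur_node]:
--             if neigh not in visited:
--                 stack.append(neigh)
--                 visited.add(neigh)
--     for curr in visited:
--         connected_components[curr] = len(visited)
--         indexing[curr] = index_num[0]
--     new_inx = index_num[0]+1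
--     index_num.pop()
--     index_num.append(new_inx)
--     return len(visited)
-- ===== SOURCE B (Python) =====
-- def dfs(node, graph, visited, connected_components, indexing, index_num):
--     if node in connected_components:
--         return connected_components[node]
--     if node in visited:
--         return 0
--     # level-synchronous flood (BFS by frontiers) instead of an explicit DFS stack
--     frontier = {node}
--     component = set()
--     while frontier:
--         component |= frontier
--         frontier = {m for n in frontier for m in graph[n]
--                     if m not in component and m not in visited}
--     visited |= component
--     size = len(visited)
--     idx = index_num[0]
--     for curr in visited:
--         connected_components[curr] = size
--         indexing[curr] = idx
--     index_num[0] = idx + 1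
--     return size
-- ===== Notes on version B (the rewrite author's own statement) =====
-- stated objective: alternative
-- what changed: The explicit stack-based DFS while-loop is replaced by a level-synchronous frontier flood (BFS by levels built with set comprehensions); guards, final bookkeeping and mutations are kept.
import Mathlib
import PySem

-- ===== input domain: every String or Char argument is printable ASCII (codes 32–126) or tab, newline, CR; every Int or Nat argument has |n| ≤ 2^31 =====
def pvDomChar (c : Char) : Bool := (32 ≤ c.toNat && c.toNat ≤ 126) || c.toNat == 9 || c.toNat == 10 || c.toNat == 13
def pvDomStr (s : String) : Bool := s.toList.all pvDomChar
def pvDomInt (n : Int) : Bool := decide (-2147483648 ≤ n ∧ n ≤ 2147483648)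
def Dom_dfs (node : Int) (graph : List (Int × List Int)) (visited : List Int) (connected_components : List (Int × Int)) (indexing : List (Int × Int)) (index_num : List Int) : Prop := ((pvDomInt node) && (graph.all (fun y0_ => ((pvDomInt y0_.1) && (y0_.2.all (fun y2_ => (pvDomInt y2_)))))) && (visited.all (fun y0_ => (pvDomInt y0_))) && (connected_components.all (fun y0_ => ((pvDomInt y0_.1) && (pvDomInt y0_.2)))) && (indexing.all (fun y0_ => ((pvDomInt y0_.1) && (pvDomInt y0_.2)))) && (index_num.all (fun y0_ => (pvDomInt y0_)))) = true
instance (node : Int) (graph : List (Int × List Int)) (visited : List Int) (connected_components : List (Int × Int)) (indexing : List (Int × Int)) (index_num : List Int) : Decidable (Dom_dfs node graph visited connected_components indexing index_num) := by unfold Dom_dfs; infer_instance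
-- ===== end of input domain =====

-- B replaces A's explicit-stack DFS while-loop by a level-synchronous frontier flood (alternative
-- decomposition, same cost). Both Pythons mutate their set/dict/list arguments; the equivalence
-- proved here is about the RETURN value only (B bumps index_num[0] in place where A pops and
-- re-appends; for a singleton index_num, as A assumes, the resulting list is the same).

-- Both versions' `graph[n]` (the KeyError inputs are excluded by Pre_dfs) port to this
-- lookup-with-default.
def dfsNbrs (graph : List (Int × List Int)) (n : Int) : List Int :=
  (PySem.Dict.mk graph).getD n []

-- ===== PORT A =====
-- body of `for neigh in graph[cur_node]: if neigh not in visited: stack.append(neigh); visited.add(neigh)`,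
-- threading the pair (visited, stack); the stack's top is the list head (Python appends/pops at the end)
def dfsInner (p : List Int × List Int) (m : Int) : List Int × List Int :=
  if m ∈ p.1 then p else (PySem.Set.add p.1 m, m :: p.2)

-- the `while len(stack) > 0` loop; the fuel is a totality guard only (2*|all neighbour lists|+3 is
-- provably enough for the loop to reach its exit condition)
def dfsLoop (graph : List (Int × List Int)) (visited stack : List Int) : Nat → List Int
  | 0 => visited
  | fuel + 1 =>
    match stack with
    | [] => visited
    | c :: rest =>
      let p := (dfsNbrs graph c).foldl dfsInner (visited, rest)
      dfsLoop graph p.1 p.2 fuel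

def dfs (node : Int) (graph : List (Int × List Int)) (visited : List Int) (connected_components : List (Int × Int)) (indexing : List (Int × Int)) (index_num : List Int) : Int :=
  if (PySem.Dict.mk connected_components).contains node then
    ((PySem.Dict.mk connected_components).get? node).getD 0
  else if node ∈ visited then 0
  else
    -- res = 1 is dead in A; the final `for curr in visited` loop and the index_num pop/append
    -- mutate arguments only and do not affect the returned len(visited)
    let v := dfsLoop graph (PySem.Set.add visited node) [node] (2 * (graph.flatMap (·.2)).length + 3)
    (v.length : Int)

-- ===== PORT B =====
-- the `while frontier` loop of B: component |= frontier, then the next frontier is the set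
-- comprehension over the current one; fuel is a totality guard (|all neighbour lists|+3 suffices)
def dfsAltLoop (graph : List (Int × List Int)) (visited : List Int) (frontier component : List Int) : Nat → List Int
  | 0 => component
  | fuel + 1 =>
    if frontier.isEmpty then component
    else
      let component' := PySem.Set.union component frontier
      let frontier' := PySem.Set.ofList
        ((frontier.flatMap (fun n => dfsNbrs graph n)).filter
          (fun m => decide (m ∉ component') && decide (m ∉ visited)))
      dfsAltLoop graph visited frontier' component' fuel

def dfs_alt (node : Int) (graph : List (Int × List Int)) (visited : List Int) (connected_components : List (Int × Int)) (indexing : List (Int × Int)) (index_num : List Int) : Int :=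
  if (PySem.Dict.mk connected_components).contains node then
    ((PySem.Dict.mk connected_components).get? node).getD 0
  else if node ∈ visited then 0
  else
    let component := dfsAltLoop graph visited [node] [] ((graph.flatMap (·.2)).length + 3)
    -- visited |= component; the dict updates and index_num[0] = idx+1 mutate arguments only
    let v := PySem.Set.union visited component
    (v.length : Int)

-- ===== PRECONDITION & SPEC =====
-- the reachable closure of the INPUT graph from `node` avoiding `visited` — a property of the
-- graph argument, not a copy of either port's loop: one saturation step appends the neighbours of
-- current members that are not yet present; iterating it |all neighbour lists|+1 times saturates
-- (each unsaturated step adds at least one of the ≤ |all neighbour lists| possible new members).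
def pvReachStep (graph : List (Int × List Int)) (visited : List Int) (S : List Int) : List Int :=
  S ++ (S.flatMap (fun n => dfsNbrs graph n)).filter
    (fun m => decide (m ∉ visited) && decide (m ∉ S))

def pvReachClos (graph : List (Int × List Int)) (visited : List Int) (node : Int) : List Int :=
  (pvReachStep graph visited)^[(graph.flatMap (·.2)).length + 1] [node]

-- When neither guard fires, Python A raises KeyError on graph[n] for a reached node n that is not
-- a key of graph and IndexError on index_num[0] when index_num is empty; Pre_ excludes exactly
-- those inputs (every node of the reachable closure from `node` avoiding `visited` must be a
-- graph key — dangling neighbours the flood never reaches remain inside Pre_).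
def Pre_dfs (node : Int) (graph : List (Int × List Int)) (visited : List Int) (connected_components : List (Int × Int)) (indexing : List (Int × Int)) (index_num : List Int) : Prop :=
  (PySem.Dict.mk connected_components).contains node = true ∨ node ∈ visited ∨
    (index_num ≠ [] ∧
      ∀ m ∈ pvReachClos graph visited node,
        ((PySem.Dict.mk graph).get? m).isSome = true)
instance (node : Int) (graph : List (Int × List Int)) (visited : List Int) (connected_components : List (Int × Int)) (indexing : List (Int × Int)) (index_num : List Int) : Decidable (Pre_dfs node graph visited connected_components indexing index_num) := by unfold Pre_dfs; infer_instance

def pvWitness_dfs : Int × (List (Int × List Int)) × List Int × (List (Int × Int)) × (List (Int × Int)) × List Int :=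
  (0, [(0, [1]), (1, [0, 2]), (2, [])], [], [], [], [5])

def Spec_dfs (node : Int) (graph : List (Int × List Int)) (visited : List Int) (connected_components : List (Int × Int)) (indexing : List (Int × Int)) (index_num : List Int) (out : Int) : Prop := out = dfs_alt node graph visited connected_components indexing index_num
instance (node : Int) (graph : List (Int × List Int)) (visited : List Int) (connected_components : List (Int × Int)) (indexing : List (Int × Int)) (index_num : List Int) (out : Int) : Decidable (Spec_dfs node graph visited connected_components indexing index_num out) := by unfold Spec_dfs; infer_instance

-- ===== CLAIM (what is proved, stated in full; the proofs are below) =====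
def Claim_equal_dfs : Prop := ∀ (node : Int) (graph : List (Int × List Int)) (visited : List Int) (connected_components : List (Int × Int)) (indexing : List (Int × Int)) (index_num : List Int), Dom_dfs node graph visited connected_components indexing index_num → Pre_dfs node graph visited connected_components indexing index_num → Spec_dfs node graph visited connected_components indexing index_num (dfs node graph visited connected_components indexing index_num)

-- ===== LEMMAS AND PROOFS =====

-- every neighbour list produced by dfsNbrs is a sublist of the concatenation of all neighbour lists
lemma mem_dfsNbrs_mem_flat (graph : List (Int × List Int)) (n m : Int)
    (h : m ∈ dfsNbrs graph n) : m ∈ graph.flatMap (·.2) := by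
  induction graph with
  | nil => simp [dfsNbrs, PySem.Dict.getD, PySem.Dict.get?] at h
  | cons p rest ih =>
    obtain ⟨k, v⟩ := p
    simp only [List.flatMap_cons, List.mem_append]
    by_cases hpk : k == n
    · left
      simpa [dfsNbrs, PySem.Dict.getD, PySem.Dict.get?_mk_cons, hpk] using h
    · right
      apply ih
      simpa [dfsNbrs, PySem.Dict.getD, PySem.Dict.get?_mk_cons, hpk] using h

-- counting: removing a Nodup subset d from L by filtering drops the length by at least |d|
lemma filter_not_mem_length_le (L d : List Int) (hd : d.Nodup) (hsub : ∀ m ∈ d, m ∈ L) :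
    (L.filter (fun m => decide (m ∉ d))).length + d.length ≤ L.length := by
  have h1 : d.Subperm (L.filter (fun m => decide (m ∈ d))) := by
    apply List.Nodup.subperm hd
    intro x hx
    simp only [List.mem_filter, decide_eq_true_eq]
    exact ⟨hsub x hx, hx⟩
  have h2 := h1.length_le
  have h3 := (List.length_eq_length_filter_add (l := L) (fun m => decide (m ∈ d))).symm
  have h4 : (L.filter (fun m => !decide (m ∈ d))) = L.filter (fun m => decide (m ∉ d)) := by
    apply List.filter_congr; intro x _; simp
  rw [h4] at h3
  omega


-- the nodes newly reachable from `node` without passing through the initially visited set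
inductive Reach (graph : List (Int × List Int)) (V : List Int) (node : Int) : Int → Prop
  | base : Reach graph V node node
  | step {n m : Int} : Reach graph V node n → m ∈ dfsNbrs graph n → m ∉ V → Reach graph V node m

-- the inner for-loop of A appends the fresh neighbours d to visited and pushes them on the stack
lemma dfsInner_foldl (ns : List Int) : ∀ (v s : List Int),
    ∃ d, ns.foldl dfsInner (v, s) = (v ++ d, d.reverse ++ s) ∧ d.Nodup ∧
      (∀ m ∈ d, m ∈ ns ∧ m ∉ v) ∧ (∀ m ∈ ns, m ∈ v ++ d) := by
  induction ns with
  | nil => intro v s; exact ⟨[], by simp, by simp, by simp, by simp⟩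
  | cons a t ih =>
    intro v s
    by_cases ha : a ∈ v
    · obtain ⟨d, heq, hnd, hmem, hall⟩ := ih v s
      refine ⟨d, ?_, hnd, ?_, ?_⟩
      · simpa [List.foldl_cons, dfsInner, ha] using heq
      · exact fun m hm => ⟨List.mem_cons_of_mem _ (hmem m hm).1, (hmem m hm).2⟩
      · intro m hm
        rcases List.mem_cons.mp hm with rfl | hm'
        · exact List.mem_append.mpr (Or.inl ha)
        · exact hall m hm'
    · obtain ⟨d, heq, hnd, hmem, hall⟩ := ih (v ++ [a]) (a :: s)
      refine ⟨a :: d, ?_, ?_, ?_, ?_⟩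
      · simp only [List.foldl_cons, dfsInner, ha, if_false]
        rw [PySem.Set.add_of_not_mem ha]
        simpa using heq
      · exact List.nodup_cons.mpr ⟨fun hc => (hmem a hc).2 (by simp), hnd⟩
      · intro m hm
        rcases List.mem_cons.mp hm with rfl | hm'
        · exact ⟨List.mem_cons_self, ha⟩
        · refine ⟨List.mem_cons_of_mem _ (hmem m hm').1, fun hc => (hmem m hm').2 (by simp [hc])⟩
      · intro m hm
        rcases List.mem_cons.mp hm with rfl | hm'
        · simp
        · have := hall m hm'
          simp only [List.append_assoc, List.mem_append] at this ⊢
          simpa using this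

-- A's while-loop: with enough fuel it returns V ++ w' where w' is Nodup, contains w, consists of
-- Reach-able nodes outside V, and is closed under eligible neighbours
lemma dfsLoop_correct (graph : List (Int × List Int)) (V : List Int) (node : Int) :
    ∀ (fuel : Nat) (w s : List Int),
      2 * ((graph.flatMap (·.2)).filter (fun m => decide (m ∉ V ++ w))).length + s.length < fuel →
      w.Nodup → (∀ x ∈ s, x ∈ w) → (∀ x ∈ w, Reach graph V node x ∧ x ∉ V) →
      (∀ x ∈ w, x ∉ s → ∀ m ∈ dfsNbrs graph x, m ∉ V → m ∈ w) →
      ∃ w', dfsLoop graph (V ++ w) s fuel = V ++ w' ∧ w'.Nodup ∧ (∀ x ∈ w, x ∈ w') ∧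
        (∀ x ∈ w', Reach graph V node x ∧ x ∉ V) ∧
        (∀ x ∈ w', ∀ m ∈ dfsNbrs graph x, m ∉ V → m ∈ w') := by
  intro fuel
  induction fuel with
  | zero => intro w s hμ; omega
  | succ fuel ih =>
    intro w s hμ hnd hs hw hcl
    match s with
    | [] =>
      exact ⟨w, rfl, hnd, fun x hx => hx, hw, fun x hx => hcl x hx (by simp)⟩
    | c :: rest =>
      obtain ⟨d, heq, hdnd, hdmem, hdall⟩ := dfsInner_foldl (dfsNbrs graph c) (V ++ w) rest
      have hc_w : c ∈ w := hs c (by simp)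
      -- the new state
      set w₂ := w ++ d with hw₂
      have hVw₂ : (V ++ w) ++ d = V ++ w₂ := by simp [hw₂]
      -- d-elements are fresh, in U, outside V
      have hdU : ∀ m ∈ d, m ∈ graph.flatMap (·.2) := fun m hm =>
        mem_dfsNbrs_mem_flat graph c m (hdmem m hm).1
      have hdnV : ∀ m ∈ d, m ∉ V ∧ m ∉ w := by
        intro m hm
        have := (hdmem m hm).2
        simp only [List.mem_append] at this
        exact ⟨fun h => this (Or.inl h), fun h => this (Or.inr h)⟩
      -- measure decreases
      have hμ₂ : 2 * ((graph.flatMap (·.2)).filter (fun m => decide (m ∉ V ++ w₂))).length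
          + (d.reverse ++ rest).length < fuel := by
        have hsplit : (graph.flatMap (·.2)).filter (fun m => decide (m ∉ V ++ w₂)) =
            ((graph.flatMap (·.2)).filter (fun m => decide (m ∉ V ++ w))).filter
              (fun m => decide (m ∉ d)) := by
          rw [List.filter_filter]
          apply List.filter_congr
          intro x _
          rw [← Bool.decide_and, decide_eq_decide]
          simp only [hw₂, List.mem_append, not_or]
          tauto
        have hcount := filter_not_mem_length_le
          ((graph.flatMap (·.2)).filter (fun m => decide (m ∉ V ++ w))) d hdnd
          (by
            intro m hm
            simp only [List.mem_filter, decide_eq_true_eq, List.mem_append, not_or]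
            exact ⟨hdU m hm, (hdnV m hm).1, (hdnV m hm).2⟩)
        rw [hsplit]
        simp only [List.length_append, List.length_reverse, List.length_cons] at hμ ⊢
        omega
      have hnd₂ : w₂.Nodup := by
        rw [hw₂, List.nodup_append]
        refine ⟨hnd, hdnd, ?_⟩
        intro a ha b hb h
        subst h
        exact (hdnV a hb).2 ha
      have hs₂ : ∀ x ∈ d.reverse ++ rest, x ∈ w₂ := by
        intro x hx
        rcases List.mem_append.mp hx with hx | hx
        · exact List.mem_append.mpr (Or.inr (List.mem_reverse.mp hx))
        · exact List.mem_append.mpr (Or.inl (hs x (by simp [hx])))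
      have hw₂R : ∀ x ∈ w₂, Reach graph V node x ∧ x ∉ V := by
        intro x hx
        rcases List.mem_append.mp hx with hx | hx
        · exact hw x hx
        · exact ⟨Reach.step (hw c hc_w).1 (hdmem x hx).1 (hdnV x hx).1, (hdnV x hx).1⟩
      have hcl₂ : ∀ x ∈ w₂, x ∉ d.reverse ++ rest → ∀ m ∈ dfsNbrs graph x, m ∉ V → m ∈ w₂ := by
        intro x hx hxs m hm hmV
        rcases List.mem_append.mp hx with hxw | hxd
        · by_cases hxc : x = c
          · subst hxc
            have := hdall m hm
            simp only [List.mem_append] at this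
            rcases this with (h | h) | h
            · exact absurd h hmV
            · exact List.mem_append.mpr (Or.inl h)
            · exact List.mem_append.mpr (Or.inr h)
          · have hxs' : x ∉ (c :: rest) := by
              intro hc
              rcases List.mem_cons.mp hc with h | h
              · exact hxc h
              · exact hxs (List.mem_append.mpr (Or.inr h))
            exact List.mem_append.mpr (Or.inl (hcl x hxw hxs' m hm hmV))
        · exact absurd (List.mem_append.mpr (Or.inl (List.mem_reverse.mpr hxd))) hxs
      obtain ⟨w', heq', hnd', hsub', hR', hcl'⟩ := ih w₂ (d.reverse ++ rest) hμ₂ hnd₂ hs₂ hw₂R hcl₂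
      refine ⟨w', ?_, hnd', fun x hx => hsub' x (List.mem_append.mpr (Or.inl hx)), hR', hcl'⟩
      show dfsLoop graph _ _ _ = _
      simp only [dfsLoop]
      rw [heq]
      simp only []
      rw [← heq', hVw₂]

-- B's while-loop: with enough fuel it returns a Nodup component containing c ++ f, made of
-- Reach-able nodes outside V, and closed under eligible neighbours
lemma dfsAltLoop_correct (graph : List (Int × List Int)) (V : List Int) (node : Int) :
    ∀ (fuel : Nat) (f c : List Int),
      ((node :: graph.flatMap (·.2)).filter (fun m => decide (m ∉ c))).length + 1 < fuel →
      (c ++ f).Nodup → (∀ x ∈ f, x ∈ node :: graph.flatMap (·.2)) →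
      (∀ x ∈ c ++ f, Reach graph V node x ∧ x ∉ V) →
      (∀ x ∈ c, ∀ m ∈ dfsNbrs graph x, m ∉ V → m ∈ c ++ f) →
      ∃ c', dfsAltLoop graph V f c fuel = c' ∧ c'.Nodup ∧ (∀ x ∈ c ++ f, x ∈ c') ∧
        (∀ x ∈ c', Reach graph V node x ∧ x ∉ V) ∧
        (∀ x ∈ c', ∀ m ∈ dfsNbrs graph x, m ∉ V → m ∈ c') := by
  intro fuel
  induction fuel with
  | zero => intro f c hμ; omega
  | succ fuel ih =>
    intro f c hμ hnd hfU hR hcl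
    match f with
    | [] =>
      refine ⟨c, by simp [dfsAltLoop], by simpa using hnd, fun x hx => by simpa using hx, ?_, ?_⟩
      · intro x hx; exact hR x (by simp [hx])
      · intro x hx m hm hmV
        have := hcl x hx m hm hmV
        simpa using this
    | a :: t =>
      set f₀ := a :: t with hf₀
      have hfne : f₀.isEmpty = false := by simp [hf₀]
      -- component' = c ++ f₀  (f₀ is Nodup and disjoint from c)
      have hndc : c.Nodup := (List.nodup_append.mp hnd).1
      have hndf : f₀.Nodup := (List.nodup_append.mp hnd).2.1
      have hdisj : ∀ x ∈ f₀, x ∉ c := by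
        intro x hx hxc
        exact (List.nodup_append.mp hnd).2.2 _ hxc _ hx rfl
      have hcomp : PySem.Set.union c f₀ = c ++ f₀ := by
        rw [PySem.Set.union]
        exact PySem.Set.update_eq_append_of_disjoint _ _ hndf hdisj
      set c₂ := c ++ f₀ with hc₂
      set f₂ := PySem.Set.ofList
        ((f₀.flatMap (fun n => dfsNbrs graph n)).filter
          (fun m => decide (m ∉ c₂) && decide (m ∉ V))) with hf₂
      have hstep : dfsAltLoop graph V f₀ c (fuel + 1) = dfsAltLoop graph V f₂ c₂ fuel := by
        conv_lhs => rw [dfsAltLoop]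
        rw [hfne]
        simp only [Bool.false_eq_true, if_false, hcomp, ← hf₂]
      -- properties of f₂
      have hf₂mem : ∀ x, x ∈ f₂ ↔ (∃ n ∈ f₀, x ∈ dfsNbrs graph n) ∧ x ∉ c₂ ∧ x ∉ V := by
        intro x
        rw [hf₂, PySem.Set.mem_ofList]
        simp [List.mem_filter, List.mem_flatMap]
      have hndf₂ : f₂.Nodup := PySem.Set.nodup_ofList _
      have hnd₂ : (c₂ ++ f₂).Nodup := by
        rw [List.nodup_append]
        refine ⟨by rw [hc₂]; exact hnd, hndf₂, ?_⟩
        intro x hx y hy hxy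
        subst hxy
        exact ((hf₂mem x).mp hy).2.1 hx
      have hf₂U : ∀ x ∈ f₂, x ∈ node :: graph.flatMap (·.2) := by
        intro x hx
        obtain ⟨⟨n, _, hn⟩, _, _⟩ := (hf₂mem x).mp hx
        exact List.mem_cons_of_mem _ (mem_dfsNbrs_mem_flat graph n x hn)
      have hR₂ : ∀ x ∈ c₂ ++ f₂, Reach graph V node x ∧ x ∉ V := by
        intro x hx
        rcases List.mem_append.mp hx with hx | hx
        · exact hR x (by rwa [hc₂] at hx)
        · obtain ⟨⟨n, hnf, hn⟩, _, hxV⟩ := (hf₂mem x).mp hx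
          exact ⟨Reach.step (hR n (List.mem_append.mpr (Or.inr hnf))).1 hn hxV, hxV⟩
      have hcl₂ : ∀ x ∈ c₂, ∀ m ∈ dfsNbrs graph x, m ∉ V → m ∈ c₂ ++ f₂ := by
        intro x hx m hm hmV
        rcases List.mem_append.mp (hc₂ ▸ hx) with hxc | hxf
        · exact List.mem_append.mpr (Or.inl (by rw [hc₂]; exact hcl x hxc m hm hmV))
        · by_cases hmc : m ∈ c₂
          · exact List.mem_append.mpr (Or.inl hmc)
          · exact List.mem_append.mpr (Or.inr ((hf₂mem m).mpr ⟨⟨x, hxf, hm⟩, hmc, hmV⟩))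
      -- measure decreases: c₂ = c ++ f₀ with f₀ nonempty subset of U'
      have hμ₂ : ((node :: graph.flatMap (·.2)).filter (fun m => decide (m ∉ c₂))).length + 1 < fuel := by
        have hsplit : (node :: graph.flatMap (·.2)).filter (fun m => decide (m ∉ c₂)) =
            ((node :: graph.flatMap (·.2)).filter (fun m => decide (m ∉ c))).filter
              (fun m => decide (m ∉ f₀)) := by
          rw [List.filter_filter]
          apply List.filter_congr
          intro x _
          rw [← Bool.decide_and, decide_eq_decide]
          simp only [hc₂, List.mem_append, not_or]
          tauto
        have hcount := filter_not_mem_length_le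
          ((node :: graph.flatMap (·.2)).filter (fun m => decide (m ∉ c))) f₀ hndf
          (by
            intro m hm
            simp only [List.mem_filter, decide_eq_true_eq]
            exact ⟨hfU m hm, hdisj m hm⟩)
        have hlen : 0 < f₀.length := by simp [hf₀]
        rw [hsplit]
        omega
      obtain ⟨c', heq', hnd', hsub', hR', hcl'⟩ := ih f₂ c₂ hμ₂ hnd₂ hf₂U hR₂ hcl₂
      refine ⟨c', by rw [hstep]; exact heq', hnd', ?_, hR', hcl'⟩
      intro x hx
      exact hsub' x (List.mem_append.mpr (Or.inl (hc₂ ▸ hx)))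

-- ===== VERDICT (by name: the statement is the Claim_ definition above) =====
theorem dfs_spec : Claim_equal_dfs := by
  unfold Claim_equal_dfs
  intro node graph visited cc indexing index_num _hdom _hpre
  unfold Spec_dfs dfs dfs_alt
  by_cases h1 : (PySem.Dict.mk cc).contains node = true
  · simp only [h1, if_true]
  · by_cases h2 : node ∈ visited
    · simp only [h1, h2, if_true]
    · simp only [h1, h2, if_false]
      -- A side
      obtain ⟨w', heqA, hndA, hsubA, hRA, hclA⟩ :=
        dfsLoop_correct graph visited node (2 * (graph.flatMap (·.2)).length + 3) [node] [node]
          (by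
            have := List.length_filter_le (fun m => decide (m ∉ visited ++ [node])) (graph.flatMap (·.2))
            simp only [List.length_cons, List.length_nil]
            omega)
          (by simp) (by simp) (by simp [Reach.base, h2])
          (by intro x hx hxs; simp at hx; subst hx; simp at hxs)
      -- B side
      obtain ⟨c', heqB, hndB, hsubB, hRB, hclB⟩ :=
        dfsAltLoop_correct graph visited node ((graph.flatMap (·.2)).length + 3) [node] []
          (by
            have := List.length_filter_le (fun m => decide (m ∉ ([] : List Int)))
              (node :: graph.flatMap (·.2))
            simp only [List.length_cons] at this
            omega)
          (by simp) (by simp) (by simp [Reach.base, h2]) (by simp)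
      -- both are exactly the Reach-closure, hence permutations of each other
      have hcomplA : ∀ x, Reach graph visited node x → x ∈ w' := by
        intro x hx
        induction hx with
        | base => exact hsubA node (by simp)
        | step hr hm hv ih => exact hclA _ ih _ hm hv
      have hcomplB : ∀ x, Reach graph visited node x → x ∈ c' := by
        intro x hx
        induction hx with
        | base => exact hsubB node (by simp)
        | step hr hm hv ih => exact hclB _ ih _ hm hv
      have hperm : w'.Perm c' := by
        rw [List.perm_ext_iff_of_nodup hndA hndB]
        intro x
        exact ⟨fun hx => hcomplB x (hRA x hx).1, fun hx => hcomplA x (hRB x hx).1⟩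
      -- assemble the two returned lengths
      have hunion : PySem.Set.union visited c' = visited ++ c' := by
        rw [PySem.Set.union]
        exact PySem.Set.update_eq_append_of_disjoint _ _ hndB (fun x hx => (hRB x hx).2)
      simp only [Bool.false_eq_true, if_false]
      rw [PySem.Set.add_of_not_mem h2, heqA, heqB, hunion]
      simp only [List.length_append]
      rw [hperm.length_eq]
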